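-- pv_equiv track=rewrite | github.com/ADS-AI/Obj2Sub-AIED2022 | Obj2Sub/code/helper.py | seperator_finding
-- ===== SOURCE A (Python) =====
-- def seperator_finding(word_tokens):
--     """
--     Function for finding an in between comma or full-stop in an objective question.
--     The first part of the question is often used for description.
--     Parameters
--     ----------
--     word_tokens: word_tokenized list of an objective question
--
--     Returns
--     --------
--     index: index of a found seperator, by default -1
--     """
--
--     index = -1
--     endTokenIndex = (
--         len(word_tokens) - 1 if word_tokens[-1] == "." else len(word_tokens) - 2
--     )
--     for i in range(endTokenIndex, -1, -1):
--         if word_tokens[i] == "," or word_tokens[i] == ".":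
--             return i
--     return index
-- ===== SOURCE B (Python) =====
-- def seperator_finding(word_tokens):
--     endTokenIndex = (
--         len(word_tokens) - 1 if word_tokens[-1] == "." else len(word_tokens) - 2
--     )
--     index = -1
--     for i in range(0, endTokenIndex + 1):
--         if word_tokens[i] == "," or word_tokens[i] == ".":
--             index = i
--     return index
-- ===== Notes on version B (the rewrite author's own statement) =====
-- stated objective: alternative
-- what changed: Replaces A's backward early-exit scan from endTokenIndex down to 0 with a single forward sweep that keeps the index of the most recent separator seen.
import Mathlib
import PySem

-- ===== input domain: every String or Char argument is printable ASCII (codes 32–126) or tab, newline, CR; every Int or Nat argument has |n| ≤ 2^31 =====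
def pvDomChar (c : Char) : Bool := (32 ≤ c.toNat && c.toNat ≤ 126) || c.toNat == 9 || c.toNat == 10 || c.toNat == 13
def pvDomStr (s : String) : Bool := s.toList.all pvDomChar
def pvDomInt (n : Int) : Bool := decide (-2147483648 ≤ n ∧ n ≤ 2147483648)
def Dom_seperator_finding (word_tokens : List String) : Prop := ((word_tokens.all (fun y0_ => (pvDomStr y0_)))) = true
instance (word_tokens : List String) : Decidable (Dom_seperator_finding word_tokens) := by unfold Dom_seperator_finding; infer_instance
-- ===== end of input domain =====

-- B replaces A's backward early-exit scan with a forward sweep keeping the last separator index (alternative decomposition, same cost).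

-- ===== PORT A =====
-- A's `for i in range(endTokenIndex, -1, -1): if …: return i` loop with early return
def pvLoopA (word_tokens : List String) : List Int → Int
  | [] => -1
  | i :: rest =>
      if (PySem.List.pyGet? word_tokens i).getD "" = "," ∨ (PySem.List.pyGet? word_tokens i).getD "" = "."
      then i else pvLoopA word_tokens rest

def seperator_finding (word_tokens : List String) : Int :=
  let endTokenIndex : Int :=
    if (PySem.List.pyGet? word_tokens (-1)).getD "" = "." then (word_tokens.length : Int) - 1
    else (word_tokens.length : Int) - 2
  pvLoopA word_tokens (PySem.List.pyRange endTokenIndex (-1) (-1))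

-- ===== PORT B =====
def seperator_finding_alt (word_tokens : List String) : Int :=
  let endTokenIndex : Int :=
    if (PySem.List.pyGet? word_tokens (-1)).getD "" = "." then (word_tokens.length : Int) - 1
    else (word_tokens.length : Int) - 2
  (PySem.List.pyRange 0 (endTokenIndex + 1) 1).foldl
    (fun index i =>
      if (PySem.List.pyGet? word_tokens i).getD "" = "," ∨ (PySem.List.pyGet? word_tokens i).getD "" = "."
      then i else index) (-1)

-- ===== PRECONDITION & SPEC =====
-- Pre_ excludes only the empty list, on which word_tokens[-1] raises IndexError in both A and B.
def Pre_seperator_finding (word_tokens : List String) : Prop := word_tokens ≠ []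
instance (word_tokens : List String) : Decidable (Pre_seperator_finding word_tokens) := by unfold Pre_seperator_finding; infer_instance
def pvWitness_seperator_finding : List String := (["What", "is", "x", ",", "choose", "one", "?"])
def Spec_seperator_finding (word_tokens : List String) (out : Int) : Prop := out = seperator_finding_alt word_tokens
instance (word_tokens : List String) (out : Int) : Decidable (Spec_seperator_finding word_tokens out) := by unfold Spec_seperator_finding; infer_instance

-- ===== CLAIM (what is proved, stated in full; the proofs are below) =====
def Claim_equal_seperator_finding : Prop := ∀ (word_tokens : List String), Dom_seperator_finding word_tokens → Pre_seperator_finding word_tokens → Spec_seperator_finding word_tokens (seperator_finding word_tokens)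

-- ===== LEMMAS AND PROOFS =====

-- first index in the list (scanned left to right) whose token is a separator
def pvFirst (word_tokens : List String) : List Int → Option Int
  | [] => none
  | i :: rest =>
      if (PySem.List.pyGet? word_tokens i).getD "" = "," ∨ (PySem.List.pyGet? word_tokens i).getD "" = "."
      then some i else pvFirst word_tokens rest

theorem pvLoopA_eq_first (wt : List String) (l : List Int) :
    pvLoopA wt l = (pvFirst wt l).getD (-1) := by
  induction l with
  | nil => rfl
  | cons i rest ih =>
      simp only [pvLoopA, pvFirst]
      split_ifs with h
      · rfl
      · simpa using ih

theorem pvFirst_append_singleton (wt : List String) (l : List Int) (i : Int) :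
    pvFirst wt (l ++ [i]) =
      (pvFirst wt l).or
        (if (PySem.List.pyGet? wt i).getD "" = "," ∨ (PySem.List.pyGet? wt i).getD "" = "."
         then some i else none) := by
  induction l with
  | nil => simp [pvFirst]
  | cons j rest ih =>
      by_cases h : (PySem.List.pyGet? wt j).getD "" = "," ∨ (PySem.List.pyGet? wt j).getD "" = "."
      · simp [pvFirst, h, Option.or]
      · simp only [List.cons_append, pvFirst, if_neg h]
        exact ih

theorem pvFoldl_eq_first_reverse (wt : List String) (l : List Int) (a : Int) :
    l.foldl
      (fun index i =>
        if (PySem.List.pyGet? wt i).getD "" = "," ∨ (PySem.List.pyGet? wt i).getD "" = "."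
        then i else index) a
      = (pvFirst wt l.reverse).getD a := by
  induction l generalizing a with
  | nil => rfl
  | cons i rest ih =>
      simp only [List.foldl_cons, List.reverse_cons, pvFirst_append_singleton]
      rw [ih]
      cases h : pvFirst wt rest.reverse with
      | some v => simp [Option.or]
      | none =>
          simp only [Option.or]
          split_ifs with hs <;> simp

-- ===== VERDICT (by name: the statement is the Claim_ definition above) =====
theorem seperator_finding_spec : Claim_equal_seperator_finding := by
  intro wt _ _
  unfold Spec_seperator_finding seperator_finding seperator_finding_alt
  rw [pvFoldl_eq_first_reverse]
  rw [pvLoopA_eq_first]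
  congr 2
  rw [PySem.List.pyRange_neg_one_eq_reverse]
  norm_num
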